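-- pv_equiv track=rewrite | github.com/moneyally/yua-t16 | tb/tb_g2_ctrl_top_smoke.py | make_gemm_descriptor
-- ===== SOURCE A (Python) =====
-- DESC_SIZE = 64
--
-- def crc8(data_bytes):
--     crc = 0x00
--     for byte in data_bytes:
--         crc ^= byte
--         for _ in range(8):
--             if crc & 0x80:
--                 crc = ((crc << 1) ^ 0x07) & 0xFF
--             else:
--                 crc = (crc << 1) & 0xFF
--     return crc
--
-- def make_gemm_descriptor(act=0x1000, wgt=0x2000, out=0x3000, kt=4):
--     """Build a 64-byte GEMM descriptor with valid CRC."""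
--     desc = [0] * DESC_SIZE
--     desc[0] = 0x02  # GEMM opcode
--     for i in range(8):
--         desc[16 + i] = (act >> (8 * i)) & 0xFF
--         desc[24 + i] = (wgt >> (8 * i)) & 0xFF
--         desc[32 + i] = (out >> (8 * i)) & 0xFF
--     for i in range(4):
--         desc[40 + i] = (kt >> (8 * i)) & 0xFF
--     desc[DESC_SIZE - 1] = crc8(desc[:DESC_SIZE - 1])
--     return desc
-- ===== SOURCE B (Python) =====
-- DESC_SIZE = 64
--
--
-- def _crc8_byte(b):
--     crc = b
--     for _ in range(8):
--         crc = ((crc << 1) ^ 0x07) & 0xFF if crc & 0x80 else (crc << 1) & 0xFF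
--     return crc
--
--
-- _CRC8_TABLE = [_crc8_byte(b) for b in range(256)]
--
--
-- def crc8_table(data_bytes):
--     crc = 0x00
--     for byte in data_bytes:
--         crc = _CRC8_TABLE[crc ^ byte]
--     return crc
--
--
-- def _le_bytes(value, n):
--     return [(value >> (8 * i)) & 0xFF for i in range(n)]
--
--
-- def make_gemm_descriptor(act=0x1000, wgt=0x2000, out=0x3000, kt=4):
--     """Build a 64-byte GEMM descriptor with valid CRC (table-driven CRC8)."""
--     body = ([0x02] + [0] * 15
--             + _le_bytes(act, 8) + _le_bytes(wgt, 8) + _le_bytes(out, 8)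
--             + _le_bytes(kt, 4) + [0] * 19)
--     return body + [crc8_table(body)]
-- ===== Notes on version B (the rewrite author's own statement) =====
-- stated objective: alternative
-- what changed: CRC8 is computed with a precomputed 256-entry lookup table (one table lookup per byte instead of an 8-iteration shift/xor loop per byte), and the descriptor is built by concatenating little-endian byte chunks instead of index-assignments into a preallocated mutable list.
import Mathlib
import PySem

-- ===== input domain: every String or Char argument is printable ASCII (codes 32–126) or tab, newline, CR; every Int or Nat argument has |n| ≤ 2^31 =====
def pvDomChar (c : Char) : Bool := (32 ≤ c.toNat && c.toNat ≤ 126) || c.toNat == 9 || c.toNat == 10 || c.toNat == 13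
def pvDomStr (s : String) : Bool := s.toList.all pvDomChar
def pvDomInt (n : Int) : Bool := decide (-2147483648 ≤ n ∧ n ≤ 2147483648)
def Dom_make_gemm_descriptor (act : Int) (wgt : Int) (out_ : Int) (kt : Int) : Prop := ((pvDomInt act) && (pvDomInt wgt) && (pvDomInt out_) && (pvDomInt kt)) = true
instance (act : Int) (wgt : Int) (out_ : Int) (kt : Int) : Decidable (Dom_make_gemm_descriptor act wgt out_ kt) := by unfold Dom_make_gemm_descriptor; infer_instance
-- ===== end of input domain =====

-- B replaces A's bit-by-bit CRC8 with a precomputed 256-entry table (one lookup per byte)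
-- and builds the 64-byte descriptor by concatenating little-endian byte chunks instead of
-- index-assignments into a mutable list (objective: alternative / more idiomatic).

-- ===== PORT A =====
-- crc8: bit-by-bit loop; 'if crc & 0x80:' truthiness = ≠ 0 (crc & 0x80 is an int)
def crc8 (data_bytes : List Int) : Int :=
  data_bytes.foldl (fun crc byte =>
    (List.range 8).foldl (fun c _ =>
      if PySem.Int.band c 0x80 ≠ 0 then
        PySem.Int.band (PySem.Int.bxor (c <<< 1) 0x07) 0xFF
      else
        PySem.Int.band (c <<< 1) 0xFF)
      (PySem.Int.bxor crc byte)) 0x00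

-- index i from range(8)/range(4) is nonnegative, so '(16+i).toNat' / '(8*i).toNat' are exact
def make_gemm_descriptor (act : Int) (wgt : Int) (out_ : Int) (kt : Int) : List Int :=
  let desc := List.replicate 64 (0 : Int)
  let desc := desc.set 0 0x02
  let desc := (PySem.List.pyRange 0 8 1).foldl (fun d i =>
    let d := d.set (16 + i).toNat (PySem.Int.band (act >>> (8 * i).toNat) 0xFF)
    let d := d.set (24 + i).toNat (PySem.Int.band (wgt >>> (8 * i).toNat) 0xFF)
    d.set (32 + i).toNat (PySem.Int.band (out_ >>> (8 * i).toNat) 0xFF)) desc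
  let desc := (PySem.List.pyRange 0 4 1).foldl (fun d i =>
    d.set (40 + i).toNat (PySem.Int.band (kt >>> (8 * i).toNat) 0xFF)) desc
  desc.set 63 (crc8 (PySem.List.slice desc none (some 63)))

-- ===== PORT B =====
def crc8Byte (b : Int) : Int :=
  (List.range 8).foldl (fun crc _ =>
    if PySem.Int.band crc 0x80 ≠ 0 then
      PySem.Int.band (PySem.Int.bxor (crc <<< 1) 0x07) 0xFF
    else
      PySem.Int.band (crc <<< 1) 0xFF) b

def crc8Table : List Int := (List.range 256).map (fun b : Nat => crc8Byte (b : Int))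

-- '_CRC8_TABLE[crc ^ byte]': the index is always in range (both operands are bytes),
-- so 'getD … 0' is exact here
def crc8_table (data_bytes : List Int) : Int :=
  data_bytes.foldl (fun crc byte => crc8Table.getD (PySem.Int.bxor crc byte).toNat 0) 0x00

def leBytes (value : Int) (n : Nat) : List Int :=
  (List.range n).map (fun i : Nat => PySem.Int.band (value >>> (8 * i : Nat)) 0xFF)

def make_gemm_descriptor_alt (act : Int) (wgt : Int) (out_ : Int) (kt : Int) : List Int :=
  let body := [0x02] ++ List.replicate 15 (0 : Int)
      ++ leBytes act 8 ++ leBytes wgt 8 ++ leBytes out_ 8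
      ++ leBytes kt 4 ++ List.replicate 19 (0 : Int)
  body ++ [crc8_table body]

-- ===== PRECONDITION & SPEC =====
def Spec_make_gemm_descriptor (act : Int) (wgt : Int) (out_ : Int) (kt : Int) (out : List Int) : Prop := out = make_gemm_descriptor_alt act wgt out_ kt
instance (act : Int) (wgt : Int) (out_ : Int) (kt : Int) (out : List Int) : Decidable (Spec_make_gemm_descriptor act wgt out_ kt out) := by unfold Spec_make_gemm_descriptor; infer_instance

-- ===== CLAIM (what is proved, stated in full; the proofs are below) =====
def Claim_equal_make_gemm_descriptor : Prop := ∀ (act : Int) (wgt : Int) (out_ : Int) (kt : Int), Dom_make_gemm_descriptor act wgt out_ kt → Spec_make_gemm_descriptor act wgt out_ kt (make_gemm_descriptor act wgt out_ kt)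

-- ===== LEMMAS AND PROOFS =====

-- any value masked with 0xFF is a byte
lemma band255_bounds (x : Int) : 0 ≤ PySem.Int.band x 255 ∧ PySem.Int.band x 255 < 256 := by
  unfold PySem.Int.band
  split_ifs with h1 h2 h2 <;> simp_all <;>
    first
    | exact lt_of_le_of_lt (Nat.cast_le.mpr (Nat.and_le_right)) (by norm_num)
    | omega

-- one inner CRC iteration always returns a byte
lemma crcStep_bounds (c : Int) :
    0 ≤ (if PySem.Int.band c 0x80 ≠ 0 then
          PySem.Int.band (PySem.Int.bxor (c <<< 1) 0x07) 0xFF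
        else PySem.Int.band (c <<< 1) 0xFF) ∧
    (if PySem.Int.band c 0x80 ≠ 0 then
          PySem.Int.band (PySem.Int.bxor (c <<< 1) 0x07) 0xFF
        else PySem.Int.band (c <<< 1) 0xFF) < 256 := by
  split_ifs <;> exact band255_bounds _

lemma crc8Byte_bounds (b : Int) : 0 ≤ crc8Byte b ∧ crc8Byte b < 256 := by
  unfold crc8Byte
  rw [show (8 : Nat) = 7 + 1 from rfl, List.range_succ, List.foldl_append]
  simp only [List.foldl_cons, List.foldl_nil]
  exact crcStep_bounds _

lemma table_lookup (x : Int) (h0 : 0 ≤ x) (h1 : x < 256) :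
    crc8Table.getD x.toNat 0 = crc8Byte x := by
  unfold crc8Table
  rw [PySem.List.getD_map_range _ 256 x.toNat 0 (by omega)]
  congr 1
  omega

lemma bxor_bounds {a b : Int} (ha0 : 0 ≤ a) (ha : a < 256) (hb0 : 0 ≤ b) (hb : b < 256) :
    0 ≤ PySem.Int.bxor a b ∧ PySem.Int.bxor a b < 256 := by
  rw [PySem.Int.bxor_of_nonneg ha0 hb0]
  have : a.toNat ^^^ b.toNat < 2 ^ 8 :=
    Nat.xor_lt_two_pow (by omega) (by omega)
  constructor
  · exact Int.natCast_nonneg _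
  · exact_mod_cast this

-- the CRC folds agree on any list of bytes
lemma crcfold_eq (l : List Int) (hl : ∀ b ∈ l, 0 ≤ b ∧ b < 256) :
    ∀ crc : Int, 0 ≤ crc → crc < 256 →
    l.foldl (fun crc byte =>
      (List.range 8).foldl (fun c _ =>
        if PySem.Int.band c 0x80 ≠ 0 then
          PySem.Int.band (PySem.Int.bxor (c <<< 1) 0x07) 0xFF
        else PySem.Int.band (c <<< 1) 0xFF)
        (PySem.Int.bxor crc byte)) crc
    = l.foldl (fun crc byte => crc8Table.getD (PySem.Int.bxor crc byte).toNat 0) crc := by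
  induction l with
  | nil => intro crc _ _; rfl
  | cons b t ih =>
    intro crc hc0 hc1
    have hb := hl b (List.mem_cons_self)
    have hx := bxor_bounds hc0 hc1 hb.1 hb.2
    have hstep := crc8Byte_bounds (PySem.Int.bxor crc b)
    simp only [List.foldl_cons]
    rw [table_lookup _ hx.1 hx.2]
    exact ih (fun x hx => hl x (List.mem_cons_of_mem _ hx)) _ hstep.1 hstep.2

lemma crc8_eq_table (l : List Int) (hl : ∀ b ∈ l, 0 ≤ b ∧ b < 256) :
    crc8 l = crc8_table l := by
  unfold crc8 crc8_table
  exact crcfold_eq l hl 0 (by norm_num) (by norm_num)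

-- every byte of B's body is a byte
lemma body_bounds (act wgt out_ kt : Int) :
    ∀ b ∈ ([0x02] ++ List.replicate 15 (0 : Int)
      ++ leBytes act 8 ++ leBytes wgt 8 ++ leBytes out_ 8
      ++ leBytes kt 4 ++ List.replicate 19 (0 : Int)), 0 ≤ b ∧ b < 256 := by
  intro b hb
  simp only [leBytes, List.mem_append, List.mem_singleton, List.mem_replicate, List.mem_map,
    List.mem_range] at hb
  rcases hb with ((((((rfl | ⟨_, rfl⟩) | ⟨i, _, rfl⟩) | ⟨i, _, rfl⟩) | ⟨i, _, rfl⟩) | ⟨i, _, rfl⟩) | ⟨_, rfl⟩)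
  all_goals (first | exact band255_bounds _ | norm_num)

-- A's packing (before the CRC byte is written) equals B's body plus a trailing 0
set_option maxHeartbeats 4000000 in
lemma pack_eq (act wgt out_ kt : Int) :
    ((PySem.List.pyRange 0 4 1).foldl (fun d i =>
        d.set (40 + i).toNat (PySem.Int.band (kt >>> (8 * i).toNat) 0xFF))
      ((PySem.List.pyRange 0 8 1).foldl (fun d i =>
        let d := d.set (16 + i).toNat (PySem.Int.band (act >>> (8 * i).toNat) 0xFF)
        let d := d.set (24 + i).toNat (PySem.Int.band (wgt >>> (8 * i).toNat) 0xFF)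
        d.set (32 + i).toNat (PySem.Int.band (out_ >>> (8 * i).toNat) 0xFF))
        ((List.replicate 64 (0 : Int)).set 0 0x02)))
    = ([0x02] ++ List.replicate 15 (0 : Int)
      ++ leBytes act 8 ++ leBytes wgt 8 ++ leBytes out_ 8
      ++ leBytes kt 4 ++ List.replicate 19 (0 : Int)) ++ [0] := by
  have h8 : PySem.List.pyRange 0 8 1 = [0, 1, 2, 3, 4, 5, 6, 7] := by decide
  have h4 : PySem.List.pyRange 0 4 1 = [0, 1, 2, 3] := by decide
  rw [h8, h4]
  simp only [List.foldl_cons, List.foldl_nil]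
  simp [leBytes, List.range_succ, List.replicate]

set_option maxHeartbeats 1000000 in
theorem equal_core (act wgt out_ kt : Int) :
    make_gemm_descriptor act wgt out_ kt = make_gemm_descriptor_alt act wgt out_ kt := by
  unfold make_gemm_descriptor make_gemm_descriptor_alt
  simp only [pack_eq]
  set body := ([0x02] ++ List.replicate 15 (0 : Int)
      ++ leBytes act 8 ++ leBytes wgt 8 ++ leBytes out_ 8
      ++ leBytes kt 4 ++ List.replicate 19 (0 : Int)) with hbody
  have hlen : body.length = 63 := by simp [hbody, leBytes]
  have hslice : PySem.List.slice (body ++ [0]) none (some 63) = body := by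
    rw [PySem.List.slice_to _ (by norm_num)]
    rw [show ((63 : Int).toNat) = body.length from by omega]
    simp
  have hset : (body ++ [(0 : Int)]).set 63 (crc8 body) = body ++ [crc8 body] := by
    rw [show (63 : Nat) = body.length + 0 from by omega, List.set_append_right _ _ (by omega)]
    simp
  rw [hslice, hset, crc8_eq_table body (by simpa [hbody] using body_bounds act wgt out_ kt)]

-- ===== VERDICT (by name: the statement is the Claim_ definition above) =====
theorem make_gemm_descriptor_spec : Claim_equal_make_gemm_descriptor := by
  intro act wgt out_ kt _
  unfold Spec_make_gemm_descriptor
  exact equal_core act wgt out_ kt
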